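-- pv_equiv track=rewrite | github.com/UW-UPL/UPLInterviewPrep | q02/is_abbr.py | isAbbrRec
-- ===== SOURCE A (Python) =====
-- def takeWhile(pred, lst):
--     res = []
--     for elem in lst:
--         if pred(elem):
--             res.append(elem)
--         else:
--             break
--     return res
--
-- def isAbbrRec(orig, test):
--     if not orig and not test:
--         return True
--     elif (not orig) != (not test):
--         return False
--     elif orig[0] == test[0]:
--         return isAbbrRec(orig[1:], test[1:])
--     elif orig[0] != test[0] and test[0].isdigit():
--         numeric_prefix = takeWhile(lambda c: c.isdigit(), test)
--         prefix_len = len(numeric_prefix)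
--         num = int(''.join(numeric_prefix))
--         return isAbbrRec(orig[num:], test[prefix_len:])
--     else:
--         return False
-- ===== SOURCE B (Python) =====
-- def isAbbrRec(orig, test):
--     n, m = len(orig), len(test)
--     i = j = 0
--     while i < n and j < m:
--         if orig[i] == test[j]:
--             i += 1
--             j += 1
--         elif test[j].isdigit():
--             num = 0
--             while j < m and test[j].isdigit():
--                 num = num * 10 + (ord(test[j]) - 48)
--                 j += 1
--             i = min(i + num, n)
--         else:
--             return False
--     return i == n and j == m
-- ===== Notes on version B (the rewrite author's own statement) =====
-- stated objective: faster
-- what changed: Replaced A's recursion that builds fresh string slices (and a takeWhile list + join + int per digit run) with a single iterative two-index pass over the original strings that parses each digit run in place by accumulating its value.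
import Mathlib
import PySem

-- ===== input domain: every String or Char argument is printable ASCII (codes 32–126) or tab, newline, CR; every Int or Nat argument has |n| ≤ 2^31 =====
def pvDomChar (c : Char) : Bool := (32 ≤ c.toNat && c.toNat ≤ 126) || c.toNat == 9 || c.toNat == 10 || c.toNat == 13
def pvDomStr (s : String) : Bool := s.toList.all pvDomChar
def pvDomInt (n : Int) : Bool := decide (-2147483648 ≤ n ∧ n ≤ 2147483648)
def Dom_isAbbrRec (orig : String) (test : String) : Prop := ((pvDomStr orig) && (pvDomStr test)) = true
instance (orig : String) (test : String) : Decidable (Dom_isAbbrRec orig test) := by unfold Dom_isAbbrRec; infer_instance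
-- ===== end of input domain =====

-- B replaces A's recursion-with-slicing (fresh list copies at every step) by a single
-- index-pointer pass that parses digit runs in place (objective: faster).

-- ===== PORT A =====
-- Python takeWhile: loop with break
def pyTakeWhile (pred : Char → Bool) : List Char → List Char
  | [] => []
  | c :: rest => if pred c then c :: pyTakeWhile pred rest else []

-- int(''.join(numeric_prefix)) ported by hand; exact here because the argument is always a
-- nonempty run of ASCII digits '0'-'9', on which int() returns the base-10 value.
def digitRunVal (cs : List Char) : Int := cs.foldl (fun a c => 10 * a + ((c.toNat : Int) - 48)) 0

-- termination lemmas cited by the ports' decreasing_by (kept small and named so the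
-- compiled definitions stay small)
theorem aGo_dec (tc : Char) (t' : List Char) (hd : PySem.Chars.isdigit tc = true) :
    (PySem.List.slice (tc :: t') (some (((pyTakeWhile PySem.Chars.isdigit (tc :: t')).length : Nat) : Int)) none).length < (tc :: t').length := by
  have hp : pyTakeWhile PySem.Chars.isdigit (tc :: t') = tc :: pyTakeWhile PySem.Chars.isdigit t' := by
    simp [pyTakeWhile, hd]
  rw [PySem.List.slice_from_natCast]
  simp [hp, List.length_drop]

def aGo (o t : List Char) : Bool :=
  match o, t with
  | [], [] => true                                   -- not orig and not test
  | [], _ :: _ => false                              -- (not orig) != (not test)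
  | _ :: _, [] => false
  | oc :: o', tc :: t' =>
    if oc = tc then aGo o' t'                        -- orig[0] == test[0]
    else if h : oc ≠ tc ∧ PySem.Chars.isdigit tc = true then
      let pref := pyTakeWhile PySem.Chars.isdigit (tc :: t')
      let num := digitRunVal pref
      aGo (PySem.List.slice (oc :: o') (some num) none)
          (PySem.List.slice (tc :: t') (some (pref.length : Int)) none)
    else false
termination_by t.length
decreasing_by
  · exact Nat.lt_succ_self _
  · exact aGo_dec tc t' h.2

def isAbbrRec (orig : String) (test : String) : Bool := aGo orig.toList test.toList

-- ===== PORT B =====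
-- inner while: parse the digit run starting at j, returning (value, index after the run)
def bScan (t : List Char) (j : Nat) (num : Nat) : Nat × Nat :=
  if h : j < t.length then
    if PySem.Chars.isdigit (t[j]'h) then bScan t (j + 1) (num * 10 + ((t[j]'h).toNat - 48))
    else (num, j)
  else (num, j)
termination_by t.length - j
decreasing_by exact Nat.sub_succ_lt_self _ _ h

theorem bScan_snd_ge (t : List Char) (j num : Nat) : j ≤ (bScan t j num).2 := by
  fun_induction bScan t j num with
  | case1 j num h hd ih => exact le_trans (Nat.le_succ j) ih
  | case2 => simp
  | case3 => simp

theorem bLoop_dec (t : List Char) (j : Nat) (h : j < t.length)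
    (hd : PySem.Chars.isdigit (t[j]'h) = true) :
    t.length - (bScan t j 0).2 < t.length - j := by
  have h1 : bScan t j 0 = bScan t (j + 1) (0 * 10 + ((t[j]'h).toNat - 48)) := by
    rw [bScan]
    simp [h, hd]
  have h2 := bScan_snd_ge t (j + 1) (0 * 10 + ((t[j]'h).toNat - 48))
  rw [h1]
  omega

def bLoop (o t : List Char) (i j : Nat) : Bool :=
  if h : i < o.length ∧ j < t.length then
    if o[i]'h.1 = t[j]'h.2 then bLoop o t (i + 1) (j + 1)
    else if hd : PySem.Chars.isdigit (t[j]'h.2) = true then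
      bLoop o t (min (i + (bScan t j 0).1) o.length) (bScan t j 0).2
    else false
  else decide (i = o.length ∧ j = t.length)
termination_by t.length - j
decreasing_by
  · exact Nat.sub_succ_lt_self _ _ h.2
  · exact bLoop_dec t j h.2 hd

def isAbbrRec_alt (orig : String) (test : String) : Bool :=
  bLoop orig.toList test.toList 0 0

-- ===== PRECONDITION & SPEC =====
def Spec_isAbbrRec (orig : String) (test : String) (out : Bool) : Prop := out = isAbbrRec_alt orig test
instance (orig : String) (test : String) (out : Bool) : Decidable (Spec_isAbbrRec orig test out) := by unfold Spec_isAbbrRec; infer_instance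

-- ===== CLAIM (what is proved, stated in full; the proofs are below) =====
def Claim_equal_isAbbrRec : Prop := ∀ (orig : String) (test : String), Dom_isAbbrRec orig test → Spec_isAbbrRec orig test (isAbbrRec orig test)

-- ===== LEMMAS AND PROOFS =====

theorem pyTakeWhile_eq (pred : Char → Bool) (l : List Char) :
    pyTakeWhile pred l = l.takeWhile pred := by
  induction l with
  | nil => simp [pyTakeWhile]
  | cons c rest ih => simp [pyTakeWhile, List.takeWhile_cons, ih]

-- the Int fold of A equals (the cast of) the Nat fold of B on digit runs
theorem digitRunVal_eq_nat (cs : List Char) (h : ∀ c ∈ cs, PySem.Chars.isdigit c = true) :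
    ∀ acc : Nat,
      cs.foldl (fun a c => 10 * a + ((c.toNat : Int) - 48)) (acc : Int)
        = ((cs.foldl (fun a c => a * 10 + (c.toNat - 48)) acc : Nat) : Int) := by
  induction cs with
  | nil => intro acc; simp
  | cons c rest ih =>
    intro acc
    have hc : PySem.Chars.isdigit c = true := h c (List.mem_cons_self)
    have h48 : 48 ≤ c.toNat := by
      simp [PySem.Chars.isdigit] at hc
      exact hc.1
    have : (10 * (acc : Int) + ((c.toNat : Int) - 48)) = ((acc * 10 + (c.toNat - 48) : Nat) : Int) := by
      push_cast [h48]; ring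
    simp only [List.foldl_cons, this]
    exact ih (fun d hd => h d (List.mem_cons_of_mem _ hd)) _

theorem bScan_spec (t : List Char) (j : Nat) (acc : Nat) :
    bScan t j acc =
      ((t.drop j).takeWhile PySem.Chars.isdigit |>.foldl (fun a c => a * 10 + (c.toNat - 48)) acc,
       j + ((t.drop j).takeWhile PySem.Chars.isdigit).length) := by
  fun_induction bScan t j acc with
  | case1 j acc h hd ih =>
    have hdrop : t.drop j = t[j] :: t.drop (j + 1) := List.drop_eq_getElem_cons h
    rw [hdrop, List.takeWhile_cons, if_pos hd]
    simp [ih]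
    omega
  | case2 j acc h hd =>
    have hdrop : t.drop j = t[j] :: t.drop (j + 1) := List.drop_eq_getElem_cons h
    rw [hdrop, List.takeWhile_cons, if_neg (by simp [hd])]
    simp
  | case3 j acc h =>
    rw [List.drop_eq_nil_of_le (by omega)]
    simp

theorem takeWhile_length_le (l : List Char) (p : Char → Bool) :
    (l.takeWhile p).length ≤ l.length := by
  simpa using List.IsPrefix.length_le (List.takeWhile_prefix p)

theorem drop_min (o : List Char) (a : Nat) : o.drop (min a o.length) = o.drop a := by
  rcases Nat.le_total a o.length with h | h
  · rw [Nat.min_eq_left h]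
  · rw [Nat.min_eq_right h, List.drop_eq_nil_of_le h, List.drop_eq_nil_of_le (le_refl _)]

theorem bLoop_eq_aGo (o t : List Char) (i j : Nat) (hi : i ≤ o.length) (hj : j ≤ t.length) :
    bLoop o t i j = aGo (o.drop i) (t.drop j) := by
  fun_induction bLoop o t i j with
  | case1 i j h heq ih =>
    rw [List.drop_eq_getElem_cons h.1, List.drop_eq_getElem_cons h.2, aGo, if_pos heq]
    exact ih (by omega) (by omega)
  | case2 i j h heq hd ih =>
    rw [List.drop_eq_getElem_cons h.1, List.drop_eq_getElem_cons h.2, aGo, if_neg heq]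
    rw [dif_pos ⟨heq, hd⟩]
    have hcons : (t[j]'h.2) :: t.drop (j + 1) = t.drop j := (List.drop_eq_getElem_cons h.2).symm
    rw [pyTakeWhile_eq, hcons]
    set pref := (t.drop j).takeWhile PySem.Chars.isdigit with hpref
    have hall : ∀ c ∈ pref, PySem.Chars.isdigit c = true := fun c hc => List.mem_takeWhile_imp hc
    have hnum : digitRunVal pref = ((pref.foldl (fun a c => a * 10 + (c.toNat - 48)) 0 : Nat) : Int) := by
      have := digitRunVal_eq_nat pref hall 0
      simpa [digitRunVal] using this
    have hscan := bScan_spec t j 0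
    rw [← hpref] at hscan
    have hplen : pref.length ≤ (t.drop j).length := by
      rw [hpref]; exact takeWhile_length_le _ _
    have hsl1 : PySem.List.slice (List.drop i o) (some (digitRunVal pref)) none
        = List.drop (i + (bScan t j 0).1) o := by
      rw [hnum, hscan, PySem.List.slice_from_natCast, List.drop_drop]
    have hsl2 : PySem.List.slice (List.drop j t) (some ((pref.length : Nat) : Int)) none
        = List.drop ((bScan t j 0).2) t := by
      rw [hscan, PySem.List.slice_from_natCast, List.drop_drop]
    rw [← List.drop_eq_getElem_cons h.1]
    show bLoop o t (min (i + (bScan t j 0).1) o.length) (bScan t j 0).2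
        = aGo (PySem.List.slice (List.drop i o) (some (digitRunVal pref)) none)
              (PySem.List.slice (List.drop j t) (some ((pref.length : Nat) : Int)) none)
    rw [hsl1, hsl2]
    have hj' : (bScan t j 0).2 ≤ t.length := by
      rw [hscan]; simp only [List.length_drop] at hplen; simp; omega
    rw [ih (by omega) hj']
    rw [hscan, drop_min]
  | case3 i j h heq hd =>
    rw [List.drop_eq_getElem_cons h.1, List.drop_eq_getElem_cons h.2, aGo, if_neg heq]
    rw [dif_neg (by simp [hd])]
  | case4 i j h =>
    rcases Nat.lt_or_ge i o.length with hio | hio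
    · have hjm : j = t.length := by omega
      rw [List.drop_eq_getElem_cons hio, hjm, List.drop_length, aGo]
      simp
      omega
    · have hio' : i = o.length := by omega
      rcases Nat.lt_or_ge j t.length with hjt | hjt
      · rw [hio', List.drop_length, List.drop_eq_getElem_cons hjt, aGo]
        simp
        omega
      · have hjt' : j = t.length := by omega
        rw [hio', hjt', List.drop_length, List.drop_length, aGo]
        simp

-- ===== VERDICT (by name: the statement is the Claim_ definition above) =====
theorem isAbbrRec_spec : Claim_equal_isAbbrRec := by
  intro orig test _
  unfold Spec_isAbbrRec isAbbrRec isAbbrRec_alt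
  rw [bLoop_eq_aGo _ _ 0 0 (Nat.zero_le _) (Nat.zero_le _)]
  simp
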